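-- pv_equiv track=rewrite | github.com/dolmayan88/PDF-Timing-Campos-Racing | PDF_Timing_v1.py | flagcounter
-- ===== SOURCE A (Python) =====
-- def flagcounter(lista):
--     flagcounter=[]
--     counter=0
--
--     for elem in lista:
--
--         if elem == 1:
--             counter=counter+1
--         flagcounter.append(counter)
--
--     return flagcounter
-- ===== SOURCE B (Python) =====
-- def flagcounter(lista):
--     ones = [i for i, e in enumerate(lista) if e == 1]
--     res = []
--     for i in range(len(lista)):
--         lo, hi = 0, len(ones)
--         while lo < hi:
--             mid = (lo + hi) // 2
--             if ones[mid] <= i: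
--                 lo = mid + 1
--             else:
--                 hi = mid
--         res.append(lo)
--     return res
-- ===== Notes on version B (the rewrite author's own statement) =====
-- stated objective: alternative
-- what changed: Instead of a single pass with a running counter, B first collects the index positions of the elements equal to 1 and then computes each output element independently as the number of such positions <= i, found by binary search (bisect_right) over the sorted position list.
import Mathlib
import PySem

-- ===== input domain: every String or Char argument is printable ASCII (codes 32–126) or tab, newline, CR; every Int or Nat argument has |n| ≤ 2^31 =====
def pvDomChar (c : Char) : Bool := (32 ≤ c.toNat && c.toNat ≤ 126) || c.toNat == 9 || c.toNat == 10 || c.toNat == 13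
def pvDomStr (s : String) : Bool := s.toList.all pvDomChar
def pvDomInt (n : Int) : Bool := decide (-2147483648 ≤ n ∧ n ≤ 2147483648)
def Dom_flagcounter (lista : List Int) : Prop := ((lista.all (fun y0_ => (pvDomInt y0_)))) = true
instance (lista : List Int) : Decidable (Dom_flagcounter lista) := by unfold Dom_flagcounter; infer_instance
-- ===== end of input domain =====

-- B replaces A's running-counter pass by a different algorithm: it collects the positions of the
-- 1s and answers each index by binary search (bisect_right) over that sorted position list.
-- ===== PORT A =====
-- A's loop: state (counter, flagcounter list), appending the current counter each step.
def flagcounterLoop (st : Int × List Int) (elem : Int) : Int × List Int :=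
  let counter := if elem = 1 then st.1 + 1 else st.1
  (counter, st.2 ++ [counter])

def flagcounter (lista : List Int) : List Int :=
  (lista.foldl flagcounterLoop (0, [])).2

-- ===== PORT B =====
-- Source B's 'while lo < hi' binary-search loop; lo, hi are nonnegative Python ints (Nat here, same
-- values; (lo + hi) // 2 on nonnegatives is Nat division). ones[mid] is in range whenever
-- hi ≤ len ones — the only way B calls it — so getD's default is never read.
def bisectLoop (ones : List Int) (i : Int) (lo hi : Nat) : Nat :=
  if lo < hi then
    let mid := (lo + hi) / 2
    if ones.getD mid 0 ≤ i then bisectLoop ones i (mid + 1) hi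
    else bisectLoop ones i lo mid
  else lo
termination_by hi - lo
decreasing_by all_goals omega

-- ones = [i for i, e in enumerate(lista) if e == 1]; then for i in range(len(lista)) append the search result
def flagcounter_alt (lista : List Int) : List Int :=
  let ones := (PySem.List.enumerate lista 0).filterMap
    (fun p => if p.2 = 1 then some p.1 else none)
  (PySem.List.pyRange 0 (lista.length : Int) 1).map
    (fun i => (bisectLoop ones i 0 ones.length : Int))

-- ===== PRECONDITION & SPEC =====
def Spec_flagcounter (lista : List Int) (out : List Int) : Prop := out = flagcounter_alt lista
instance (lista : List Int) (out : List Int) : Decidable (Spec_flagcounter lista out) := by unfold Spec_flagcounter; infer_instance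

-- ===== CLAIM (what is proved, stated in full; the proofs are below) =====
def Claim_equal_flagcounter : Prop := ∀ (lista : List Int), Dom_flagcounter lista → Spec_flagcounter lista (flagcounter lista)

-- ===== LEMMAS AND PROOFS =====

-- A's loop from an arbitrary counter and accumulator yields the prefix counts shifted by that counter.
theorem flagcounter_loop_prefix (lista : List Int) : ∀ (c : Int) (acc : List Int),
    (lista.foldl flagcounterLoop (c, acc)).2
      = acc ++ (List.range lista.length).map (fun k => c + ((lista.take (k + 1)).count 1 : Int)) := by
  induction lista with
  | nil => intro c acc; simp
  | cons e rest ih =>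
    intro c acc
    simp only [List.foldl_cons, flagcounterLoop, List.length_cons,
      List.range_succ_eq_map, List.map_cons, List.map_map]
    by_cases h : e = 1 <;>
      simp [h, ih, Function.comp, List.append_assoc, add_assoc, add_comm]

-- a list classified by an index threshold r has countP = r
theorem countP_eq_of_threshold {l : List Int} {p : Int → Bool} {r : Nat} (hr : r ≤ l.length)
    (h1 : ∀ j (hj : j < l.length), j < r → p l[j] = true)
    (h2 : ∀ j (hj : j < l.length), r ≤ j → p l[j] = false) :
    l.countP p = r := by
  have hsplit : l = l.take r ++ l.drop r := (List.take_append_drop r l).symm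
  conv_lhs => rw [hsplit]
  rw [List.countP_append]
  have ht : (l.take r).countP p = r := by
    rw [List.countP_eq_length.2, List.length_take_of_le hr]
    intro a ha
    obtain ⟨j, hj, rfl⟩ := List.mem_iff_getElem.1 ha
    have hjr : j < r := by simpa [List.length_take_of_le hr] using hj
    have hjl : j < l.length := lt_of_lt_of_le hjr hr
    simpa [List.getElem_take] using h1 j hjl hjr
  have hd : (l.drop r).countP p = 0 := by
    rw [List.countP_eq_zero]
    intro a ha
    obtain ⟨j, hj, rfl⟩ := List.mem_iff_getElem.1 ha
    have hjl : r + j < l.length := by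
      have := hj; simp [List.length_drop] at this; omega
    simp only [List.getElem_drop]
    simp [h2 (r + j) hjl (Nat.le_add_right r j)]
  omega

-- binary-search correctness: on a ≤-sorted list, with everything left of lo known ≤ i and
-- everything right of hi known > i, the loop returns the number of elements ≤ i.
theorem bisectLoop_countP (ones : List Int) (i : Int)
    (hsort : ones.Pairwise (· ≤ ·)) :
    ∀ (lo hi : Nat), lo ≤ hi → hi ≤ ones.length →
    (∀ j (hj : j < ones.length), j < lo → ones[j] ≤ i) →
    (∀ j (hj : j < ones.length), hi ≤ j → i < ones[j]) →
    bisectLoop ones i lo hi = ones.countP (fun x => decide (x ≤ i)) := by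
  have hmono := List.pairwise_iff_getElem.1 hsort
  intro lo hi
  induction hfuel : hi - lo using Nat.strong_induction_on generalizing lo hi with
  | _ n ih =>
  intro hlohi hhi hlo hhi'
  rw [bisectLoop]
  by_cases h : lo < hi
  · simp only [h, if_true]
    have hmid1 : lo ≤ (lo + hi) / 2 := by omega
    have hmid2 : (lo + hi) / 2 < hi := by omega
    have hmlt : (lo + hi) / 2 < ones.length := lt_of_lt_of_le hmid2 hhi
    rw [List.getD_eq_getElem ones 0 hmlt]
    by_cases hc : ones[(lo + hi) / 2] ≤ i
    · simp only [hc, if_true]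
      refine ih (hi - ((lo + hi) / 2 + 1)) (by omega) ((lo + hi) / 2 + 1) hi rfl (by omega) hhi ?_ hhi'
      intro j hj hjlt
      rcases Nat.lt_or_ge j ((lo + hi) / 2) with he | he
      · exact le_trans (hmono j ((lo + hi) / 2) hj hmlt he) hc
      · have : j = (lo + hi) / 2 := by omega
        subst this; exact hc
    · simp only [hc, if_false]
      refine ih ((lo + hi) / 2 - lo) (by omega) lo ((lo + hi) / 2) rfl (by omega) (le_of_lt hmlt) hlo ?_
      intro j hj hjge
      rcases Nat.lt_or_ge ((lo + hi) / 2) j with he | he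
      · exact lt_of_lt_of_le (lt_of_not_ge hc) (hmono ((lo + hi) / 2) j hmlt hj he)
      · have : j = (lo + hi) / 2 := by omega
        subst this; exact lt_of_not_ge hc
  · simp only [h, if_false]
    have heq : lo = hi := by omega
    subst heq
    refine (countP_eq_of_threshold hhi ?_ ?_).symm
    · intro j hj hjlo; simpa using hlo j hj hjlo
    · intro j hj hjlo; simpa using hhi' j hj hjlo

-- the collected 1-positions are increasing (enumerate's indices are)
theorem ones_pairwise_le (lista : List Int) :
    ((PySem.List.enumerate lista 0).filterMap
      (fun p => if p.2 = 1 then some p.1 else none)).Pairwise (· ≤ ·) := by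
  have h := PySem.List.pairwise_lt_enumerate (xs := lista) (s := 0)
  have := List.Pairwise.filterMap (f := fun (p : Int × Int) => if p.2 = 1 then some p.1 else none) (S := (· ≤ ·)) ?_ h
  · exact this
  · intro a b hab x hx y hy
    by_cases h2 : a.2 = 1 <;> by_cases h3 : b.2 = 1 <;> simp [h2, h3] at hx hy
    subst hx; subst hy; exact le_of_lt hab

-- positions of 1s: the number of positions ≤ c equals the count of 1s in the prefix up to c
theorem countP_ones_prefix (lista : List Int) : ∀ (s c : Int),
    (((PySem.List.enumerate lista s).filterMap
        (fun p => if p.2 = 1 then some p.1 else none)).countP (fun x => decide (x ≤ c)))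
      = if c < s then 0 else (lista.take ((c - s).toNat + 1)).count 1 := by
  induction lista with
  | nil => intro s c; simp [PySem.List.enumerate_nil]
  | cons e rest ih =>
    intro s c
    rw [PySem.List.enumerate_cons]
    simp only [List.filterMap_cons]
    have hrest := ih (s + 1) c
    by_cases h2 : e = 1 <;> by_cases hcs : c < s
    · -- e = 1, c < s
      rw [if_pos (by simpa using h2), List.countP_cons, hrest,
        if_pos (show c < s + 1 by omega), if_pos hcs]
      simp [show ¬ ((s : Int) ≤ c) by omega]
    · by_cases hcs1 : c < s + 1
      · -- e = 1, c = s
        have hc : c = s := by omega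
        rw [if_pos (by simpa using h2), List.countP_cons, hrest,
          if_pos hcs1, if_neg hcs]
        simp [hc, h2]
      · -- e = 1, c > s
        have ht : (c - s).toNat = (c - (s + 1)).toNat + 1 := by omega
        rw [if_pos (by simpa using h2), List.countP_cons, hrest,
          if_neg hcs1, if_neg hcs, ht, List.take_succ_cons, List.count_cons]
        simp [h2, show (s : Int) ≤ c by omega]
    · -- e ≠ 1, c < s
      rw [if_neg (by simpa using h2), hrest,
        if_pos (show c < s + 1 by omega), if_pos hcs]
    · by_cases hcs1 : c < s + 1
      · -- e ≠ 1, c = s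
        rw [if_neg (by simpa using h2), hrest, if_pos hcs1, if_neg hcs]
        simp [show (c - s).toNat = 0 by omega, h2]
      · -- e ≠ 1, c > s
        have ht : (c - s).toNat = (c - (s + 1)).toNat + 1 := by omega
        rw [if_neg (by simpa using h2), hrest, if_neg hcs1, if_neg hcs, ht,
          List.take_succ_cons, List.count_cons]
        simp [h2]

-- ===== VERDICT (by name: the statement is the Claim_ definition above) =====
theorem flagcounter_spec : Claim_equal_flagcounter := by
  intro lista _
  unfold Spec_flagcounter flagcounter flagcounter_alt
  rw [flagcounter_loop_prefix lista 0 [], PySem.List.pyRange_zero_nat, List.map_map]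
  refine (List.nil_append _).trans (List.map_congr_left (fun k hk => ?_))
  simp only [Function.comp_apply]
  rw [bisectLoop_countP _ _ (ones_pairwise_le lista) 0 _ (Nat.zero_le _) le_rfl
        (by intro j hj hlt; omega) (by intro j hj hge; omega),
      countP_ones_prefix lista 0 (k : Int)]
  simp
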